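-- pv_equiv track=rewrite | github.com/ruthhhs/UnivCodeJourney | semester_1/praktikum/daspro_7/A2/curiUang.py | angka
-- ===== SOURCE A (Python) =====
-- def konso(e, L):
--     return [e] + L
--
-- def firstElmt(L):
--     return L[0]
--
-- def tail(L):
--     return L[1:]
--
-- def isEmpty(L):
--     return L == []
--
-- def isInt (x) :
--     if x=='1' or x=='2' or x=='3' or x=='4' or x=='5' or x=='6' or x=='7' or x=='8' or x=='9' or x=='0' :
--         return True
--     else :
--         return False
--
-- def angka (L) :
--     if isEmpty(L) :
--         return []
--     else :
--         if isInt(firstElmt(L)) :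
--             return konso(firstElmt(L), angka(tail(L)))
--         else :
--             return angka(tail(L))
-- ===== SOURCE B (Python) =====
-- DIGITS = ('0', '1', '2', '3', '4', '5', '6', '7', '8', '9')
--
-- def angka(L):
--     result = []
--     for c in L:
--         if c in DIGITS:
--             result.append(c)
--     return result
-- ===== Notes on version B (the rewrite author's own statement) =====
-- stated objective: faster
-- what changed: Replaced recursion via konso/firstElmt/tail/isEmpty helpers (which rebuilds a new list with [e]+rest at every kept element and slices the tail each step) by a single iterative forward pass appending to one accumulator list.
import Mathlib
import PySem

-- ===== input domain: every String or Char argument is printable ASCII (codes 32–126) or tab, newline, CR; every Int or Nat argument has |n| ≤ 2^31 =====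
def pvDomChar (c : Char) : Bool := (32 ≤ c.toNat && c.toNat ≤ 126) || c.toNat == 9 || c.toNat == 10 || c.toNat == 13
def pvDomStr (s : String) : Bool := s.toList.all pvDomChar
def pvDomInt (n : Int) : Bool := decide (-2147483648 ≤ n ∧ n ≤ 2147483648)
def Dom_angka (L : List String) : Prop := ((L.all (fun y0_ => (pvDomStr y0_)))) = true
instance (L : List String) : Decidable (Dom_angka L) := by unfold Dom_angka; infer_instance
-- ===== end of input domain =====

-- B replaces A's recursion-with-helpers by a single iterative pass with an accumulator (simpler).

-- ===== PORT A =====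
def konso (e : String) (L : List String) : List String := [e] ++ L

def firstElmt (L : List String) : Option String := PySem.List.pyGet? L 0

def tailA (L : List String) : List String := PySem.List.slice L (some 1) none

def isEmptyA (L : List String) : Bool := L == []

def isInt (x : String) : Bool :=
  if x == "1" || x == "2" || x == "3" || x == "4" || x == "5" || x == "6" || x == "7" || x == "8" || x == "9" || x == "0" then
    true
  else
    false

def angka (L : List String) : List String :=
  if isEmptyA L then
    []
  else
    -- firstElmt cannot fail here since L is non-empty; match is the literal L[0] access
    match firstElmt L with
    | none => []
    | some h =>
      if isInt h then
        konso h (angka (tailA L))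
      else
        angka (tailA L)
decreasing_by
  all_goals
    simp [tailA, PySem.List.slice_from_one]
    cases L with
    | nil => simp_all [isEmptyA]
    | cons a t => simp

-- ===== PORT B =====
def digitsB : List String := ["0", "1", "2", "3", "4", "5", "6", "7", "8", "9"]

def angka_alt (L : List String) : List String :=
  L.foldl (fun result c => if c ∈ digitsB then result ++ [c] else result) []

-- ===== PRECONDITION & SPEC =====
def Spec_angka (L : List String) (out : List String) : Prop := out = angka_alt L
instance (L : List String) (out : List String) : Decidable (Spec_angka L out) := by unfold Spec_angka; infer_instance

-- ===== CLAIM (what is proved, stated in full; the proofs are below) =====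
def Claim_equal_angka : Prop := ∀ (L : List String), Dom_angka L → Spec_angka L (angka L)

-- ===== LEMMAS AND PROOFS =====

theorem isInt_mem (x : String) : isInt x = decide (x ∈ digitsB) := by
  simp [isInt, digitsB]
  by_cases h1 : x = "1" <;> by_cases h2 : x = "2" <;> by_cases h3 : x = "3" <;>
    by_cases h4 : x = "4" <;> by_cases h5 : x = "5" <;> by_cases h6 : x = "6" <;>
    by_cases h7 : x = "7" <;> by_cases h8 : x = "8" <;> by_cases h9 : x = "9" <;>
    by_cases h0 : x = "0" <;> simp_all

theorem angka_alt_acc (L : List String) (acc : List String) :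
    L.foldl (fun result c => if c ∈ digitsB then result ++ [c] else result) acc
      = acc ++ L.foldl (fun result c => if c ∈ digitsB then result ++ [c] else result) [] := by
  induction L generalizing acc with
  | nil => simp
  | cons h t ih =>
    simp only [List.foldl_cons]
    rw [ih, ih (if h ∈ digitsB then [] ++ [h] else [])]
    split <;> simp

theorem angka_eq (L : List String) : angka L = angka_alt L := by
  induction L with
  | nil => simp [angka, angka_alt, isEmptyA]
  | cons h t ih =>
    rw [angka]
    simp only [isEmptyA, firstElmt, tailA, angka_alt] at *
    simp only [PySem.List.pyGet?, PySem.List.pyIdx?, PySem.List.slice_from_one]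
    norm_num
    rw [isInt_mem, ih, angka_alt_acc t (if h ∈ digitsB then [h] else [])]
    split <;> simp_all [konso]

-- ===== VERDICT (by name: the statement is the Claim_ definition above) =====
theorem angka_spec : Claim_equal_angka := by
  intro L _; exact angka_eq L
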